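-- pv_equiv track=rewrite | github.com/pranav-kural/MIT_6.00.0x_IntroCompSci | Midterm/satisfiesF.py | satisfiesF
-- ===== SOURCE A (Python) =====
-- def satisfiesF(L):
--     """
--     Assumes L is a list of strings
--     Assume function f is already defined for you and it maps a string to a Boolean
--     Mutates L such that it contains all of the strings, s, originally in L such
--             that f(s) returns True, and no other elements. Remaining elements in L
--             should be in the same order.
--     Returns the length of L after mutation
--     """
--     currentLen = len(L)
--     index = 0
--     while index < currentLen:
--       if not f(L[index]):
--         L.pop(index)
--         currentLen = len(L)
--         continue
--       index += 1
--
--     return len(L)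
--
-- def f(s):
--     return 'a' in s
-- ===== SOURCE B (Python) =====
-- def satisfiesF(L):
--     # One-pass rebuild: keep survivors via a single filter, assign back in place.
--     L[:] = [s for s in L if f(s)]
--     return len(L)
--
-- def f(s):
--     return 'a' in s
-- ===== Notes on version B (the rewrite author's own statement) =====
-- stated objective: faster
-- what changed: Replaces the while-loop that repeatedly pops at the current index (each pop shifts the tail) with a single list-comprehension filter assigned back in slice form.
import Mathlib
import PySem

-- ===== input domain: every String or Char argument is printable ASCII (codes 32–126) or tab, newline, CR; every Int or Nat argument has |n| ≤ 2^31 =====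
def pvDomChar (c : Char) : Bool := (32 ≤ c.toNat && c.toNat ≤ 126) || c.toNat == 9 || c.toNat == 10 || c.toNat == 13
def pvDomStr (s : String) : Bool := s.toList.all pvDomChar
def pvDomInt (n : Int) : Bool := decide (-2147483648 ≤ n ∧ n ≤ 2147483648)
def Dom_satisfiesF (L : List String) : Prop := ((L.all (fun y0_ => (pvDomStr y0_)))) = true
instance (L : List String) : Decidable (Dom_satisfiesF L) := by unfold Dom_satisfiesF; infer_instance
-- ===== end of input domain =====

-- B replaces A's O(n^2) pop-at-index loop by a single filter pass (return value; both mutate L to the filtered list).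

-- ===== PORT A =====
-- f(s) = 'a' in s
def pvF (s : String) : Bool := PySem.Str.isIn "a" s

-- A's while loop. A keeps currentLen = len(L) (it re-reads len after every pop),
-- so the loop state is (L, index); the guard makes the access and pop in range:
-- L[index] is the in-range getElem, L.pop(index) = L.eraseIdx index (PySem.List.pop?_natCast).
def satisfiesFLoop (L : List String) (index : Nat) : List String :=
  if h : index < L.length then
    if ¬ pvF (L[index]) then
      satisfiesFLoop (L.eraseIdx index) index
    else
      satisfiesFLoop L (index + 1)
  else L
termination_by L.length - index
decreasing_by
  · have := List.length_eraseIdx_of_lt h; omega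
  · omega

def satisfiesF (L : List String) : Int :=
  ((satisfiesFLoop L 0).length : Int)

-- ===== PORT B =====
-- [s for s in L if f(s)], then its len
def satisfiesF_alt (L : List String) : Int :=
  ((L.filter (fun s => pvF s)).length : Int)

-- ===== PRECONDITION & SPEC =====
def Spec_satisfiesF (L : List String) (out : Int) : Prop := out = satisfiesF_alt L
instance (L : List String) (out : Int) : Decidable (Spec_satisfiesF L out) := by unfold Spec_satisfiesF; infer_instance

-- ===== CLAIM (what is proved, stated in full; the proofs are below) =====
def Claim_equal_satisfiesF : Prop := ∀ (L : List String), Dom_satisfiesF L → Spec_satisfiesF L (satisfiesF L)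

-- ===== LEMMAS AND PROOFS =====

theorem satisfiesFLoop_eq (L : List String) (index : Nat) :
    satisfiesFLoop L index = L.take index ++ (L.drop index).filter (fun s => pvF s) := by
  fun_induction satisfiesFLoop L index with
  | case1 L index h hf ih =>
    rw [ih]
    have hdrop : L.drop index = L[index] :: L.drop (index + 1) :=
      List.drop_eq_getElem_cons h
    have hlen : (L.take index).length = index := List.length_take_of_le (by omega)
    rw [List.eraseIdx_eq_take_drop_succ, List.take_append, List.drop_append, hlen]
    simp only [Bool.not_eq_true] at hf
    rw [hdrop, List.filter_cons, hf]
    simp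
  | case2 L index h hf ih =>
    rw [ih]
    have htake : L.take (index + 1) = L.take index ++ [L[index]] :=
      List.take_succ_eq_append_getElem h
    have hf' : pvF L[index] = true := by simpa using hf
    rw [List.drop_eq_getElem_cons h, List.filter_cons, hf', htake,
        List.append_assoc, List.singleton_append, if_pos rfl]
  | case3 L index h =>
    have : L.length ≤ index := by omega
    simp [List.drop_eq_nil_of_le this, List.take_of_length_le this]

-- ===== VERDICT (by name: the statement is the Claim_ definition above) =====
theorem satisfiesF_spec : Claim_equal_satisfiesF := by
  intro L _
  unfold Spec_satisfiesF satisfiesF satisfiesF_alt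
  rw [satisfiesFLoop_eq]
  simp
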